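-- pv_equiv track=rewrite | github.com/swordy/ao-daily-discovery | src/scorer.py | _best_category
-- ===== SOURCE A (Python) =====
-- def _best_category(text: str, categories: dict) -> tuple[str, int, list[str]]:
--     """Find the best matching category for a market."""
--     best_cat = "Autre"
--     best_score = 1
--     best_hits = 0
--     all_cats = []
--
--     for cat_name, cat_data in categories.items():
--         keywords = cat_data.get("keywords", [])
--         hits = sum(1 for kw in keywords if kw.lower() in text)
--         if hits >= 2:
--             all_cats.append(cat_name)
--
--         if hits >= 4:
--             cat_score = 5
--         elif hits >= 3:
--             cat_score = 4
--         elif hits >= 2: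
--             cat_score = 3
--         elif hits >= 1:
--             cat_score = 2
--         else:
--             cat_score = 1
--
--         if cat_score > best_score or (cat_score == best_score and hits > best_hits):
--             best_score = cat_score
--             best_cat = cat_name
--             best_hits = hits
--
--     if not all_cats and best_hits >= 1:
--         all_cats = [best_cat]
--
--     return best_cat, best_score, all_cats
-- ===== SOURCE B (Python) =====
-- def _best_category(text: str, categories: dict) -> tuple[str, int, list[str]]:
--     scored = [(name, sum(1 for kw in data.get("keywords", []) if kw.lower() in text))
--               for name, data in categories.items()]
--     best_cat, best_hits = "Autre", 0
--     for name, h in scored: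
--         if h > best_hits:
--             best_cat, best_hits = name, h
--     all_cats = [name for name, h in scored if h >= 2]
--     if not all_cats and best_hits:
--         all_cats = [best_cat]
--     return best_cat, min(best_hits, 4) + 1, all_cats
-- ===== Notes on version B (the rewrite author's own statement) =====
-- stated objective: simpler
-- what changed: A's single stateful loop with a 5-way elif score ladder and a lexicographic (score, hits) tie-break is replaced by: a list of per-category hit counts, a plain first-max argmax on hits alone (the lex comparison collapses since score is monotone in hits), the closed form min(hits,4)+1 for the score, and a comprehension for the qualifying categories.
import Mathlib
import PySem

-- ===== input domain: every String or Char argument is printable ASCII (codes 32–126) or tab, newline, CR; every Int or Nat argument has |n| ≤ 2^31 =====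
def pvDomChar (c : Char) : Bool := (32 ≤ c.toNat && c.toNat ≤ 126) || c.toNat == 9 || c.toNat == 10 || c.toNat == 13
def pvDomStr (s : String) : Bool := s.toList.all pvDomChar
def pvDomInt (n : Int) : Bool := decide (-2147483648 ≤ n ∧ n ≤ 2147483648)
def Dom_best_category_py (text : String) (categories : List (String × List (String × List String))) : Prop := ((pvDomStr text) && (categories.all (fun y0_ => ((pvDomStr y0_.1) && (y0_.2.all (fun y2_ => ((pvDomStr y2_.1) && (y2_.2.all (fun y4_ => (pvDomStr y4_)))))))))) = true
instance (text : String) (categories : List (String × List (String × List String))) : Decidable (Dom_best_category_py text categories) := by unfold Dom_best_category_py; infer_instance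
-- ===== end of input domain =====

-- B replaces A's stateful loop (5-way score branch + lexicographic tie-break) by a hits list,
-- a plain argmax on hits, the closed form min(hits,4)+1 for the score, and a filter for all_cats
-- (objective: simpler; same asymptotic cost).

-- shared helper: hits = sum(1 for kw in cat_data.get("keywords", []) if kw.lower() in text)
-- (both Pythons contain this exact expression)
def pvHits (text : String) (cat_data : List (String × List String)) : Int :=
  ((PySem.Dict.ofList cat_data).getD "keywords" []).foldl
    (fun n kw => if PySem.Str.isIn (PySem.Str.lower kw) text then n + 1 else n) 0

-- ===== PORT A =====
-- the elif chain assigning cat_score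
def pvScoreA (hits : Int) : Int :=
  if hits ≥ 4 then 5 else if hits ≥ 3 then 4 else if hits ≥ 2 then 3 else if hits ≥ 1 then 2 else 1

-- loop body of A; state = (best_cat, best_score, best_hits, all_cats)
def pvStepA (text : String) (st : String × Int × Int × List String)
    (p : String × List (String × List String)) : String × Int × Int × List String :=
  let hits := pvHits text p.2
  let all_cats := if hits ≥ 2 then st.2.2.2 ++ [p.1] else st.2.2.2
  let cat_score := pvScoreA hits
  if cat_score > st.2.1 ∨ (cat_score = st.2.1 ∧ hits > st.2.2.1) then
    (p.1, cat_score, hits, all_cats)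
  else
    (st.1, st.2.1, st.2.2.1, all_cats)

def best_category_py (text : String) (categories : List (String × List (String × List String))) : String × Int × List String :=
  let st := (PySem.Dict.ofList categories).items.foldl (pvStepA text) ("Autre", 1, 0, [])
  let all_cats := if st.2.2.2 = [] ∧ st.2.2.1 ≥ 1 then [st.1] else st.2.2.2
  (st.1, st.2.1, all_cats)

-- ===== PORT B =====
def best_category_py_alt (text : String) (categories : List (String × List (String × List String))) : String × Int × List String :=
  let scored := (PySem.Dict.ofList categories).items.map (fun p => (p.1, pvHits text p.2))
  let best := scored.foldl (fun b q => if q.2 > b.2 then q else b) ("Autre", (0 : Int))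
  let all_cats := (scored.filter (fun q => q.2 ≥ 2)).map (fun q => q.1)
  let all_cats := if all_cats = [] ∧ best.2 ≠ 0 then [best.1] else all_cats
  (best.1, min best.2 4 + 1, all_cats)

-- ===== PRECONDITION & SPEC =====
def Spec_best_category_py (text : String) (categories : List (String × List (String × List String))) (out : String × Int × List String) : Prop := out = best_category_py_alt text categories
instance (text : String) (categories : List (String × List (String × List String))) (out : String × Int × List String) : Decidable (Spec_best_category_py text categories out) := by unfold Spec_best_category_py; infer_instance

-- ===== CLAIM (what is proved, stated in full; the proofs are below) =====
def Claim_equal_best_category_py : Prop := ∀ (text : String) (categories : List (String × List (String × List String))), Dom_best_category_py text categories → Spec_best_category_py text categories (best_category_py text categories)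

-- ===== LEMMAS AND PROOFS =====

theorem pvHits_nonneg (text : String) (d : List (String × List String)) : 0 ≤ pvHits text d := by
  unfold pvHits
  generalize (PySem.Dict.ofList d).getD "keywords" [] = ks
  induction ks using List.reverseRecOn with
  | nil => simp
  | append_singleton xs x ih =>
      rw [List.foldl_append]
      simp only [List.foldl]
      split <;> omega

-- the lexicographic (score, hits) comparison collapses to a hits comparison
theorem pvCond_iff (a b : Int) (ha : 0 ≤ a) (hb : 0 ≤ b) :
    (pvScoreA a > pvScoreA b ∨ (pvScoreA a = pvScoreA b ∧ a > b)) ↔ a > b := by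
  unfold pvScoreA; split_ifs <;> omega

theorem pvScoreA_eq_min (h : Int) (hh : 0 ≤ h) : pvScoreA h = min h 4 + 1 := by
  unfold pvScoreA; simp only [min_def]; split_ifs <;> omega

-- main loop invariant: A's fold from (c, scoreA h, h, all) equals B's argmax fold plus the filter
theorem pvFold_eq (text : String) (l : List (String × List (String × List String)))
    (c : String) (h : Int) (all : List String) (hh : 0 ≤ h) :
    l.foldl (pvStepA text) (c, pvScoreA h, h, all) =
      (let best := (l.map (fun p => (p.1, pvHits text p.2))).foldl
          (fun b q => if q.2 > b.2 then q else b) (c, h)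
       (best.1, pvScoreA best.2, best.2,
        all ++ ((l.map (fun p => (p.1, pvHits text p.2))).filter (fun q => q.2 ≥ 2)).map (fun q => q.1))) := by
  induction l generalizing c h all with
  | nil => simp
  | cons p t ih =>
      simp only [List.foldl_cons, List.map_cons, List.filter_cons]
      have hnn := pvHits_nonneg text p.2
      by_cases hgt : pvHits text p.2 > h
      · have hstep : pvStepA text (c, pvScoreA h, h, all) p =
            (p.1, pvScoreA (pvHits text p.2), pvHits text p.2,
              if pvHits text p.2 ≥ 2 then all ++ [p.1] else all) := by
          have hc : (pvScoreA (pvHits text p.2) > pvScoreA h ∨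
              (pvScoreA (pvHits text p.2) = pvScoreA h ∧ pvHits text p.2 > h)) :=
            (pvCond_iff _ _ hnn hh).mpr hgt
          unfold pvStepA; simp [hc]
        rw [hstep, ih _ _ _ hnn]
        simp only [if_pos hgt]
        by_cases h2 : pvHits text p.2 ≥ 2 <;> simp [h2]
      · have hstep : pvStepA text (c, pvScoreA h, h, all) p =
            (c, pvScoreA h, h, if pvHits text p.2 ≥ 2 then all ++ [p.1] else all) := by
          have hc : ¬ (pvScoreA (pvHits text p.2) > pvScoreA h ∨
              (pvScoreA (pvHits text p.2) = pvScoreA h ∧ pvHits text p.2 > h)) := by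
            intro hx; exact hgt ((pvCond_iff _ _ hnn hh).mp hx)
          unfold pvStepA; simp [hc]
        rw [hstep, ih _ _ _ hh]
        simp only [if_neg hgt]
        by_cases h2 : pvHits text p.2 ≥ 2 <;> simp [h2]

theorem pvArgmax_nonneg (l : List (String × Int)) (c : String) (h : Int) (hh : 0 ≤ h) :
    0 ≤ (l.foldl (fun b q => if q.2 > b.2 then q else b) (c, h)).2 := by
  induction l generalizing c h with
  | nil => exact hh
  | cons q t ih =>
      simp only [List.foldl_cons]
      split
      · exact ih _ _ (by omega)
      · exact ih _ _ hh

-- ===== VERDICT (by name: the statement is the Claim_ definition above) =====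
theorem best_category_py_spec : Claim_equal_best_category_py := by
  intro text categories _
  unfold Spec_best_category_py best_category_py best_category_py_alt
  have h0 : ("Autre", (1 : Int), (0 : Int), ([] : List String))
      = ("Autre", pvScoreA 0, (0 : Int), ([] : List String)) := by decide
  rw [h0, pvFold_eq text _ "Autre" 0 [] le_rfl]
  simp only [List.nil_append]
  set scored := (PySem.Dict.ofList categories).items.map (fun p => (p.1, pvHits text p.2)) with hsc
  set best := scored.foldl (fun b q => if q.2 > b.2 then q else b) ("Autre", (0 : Int)) with hb
  have hbn : 0 ≤ best.2 := pvArgmax_nonneg _ _ _ le_rfl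
  have hmin : pvScoreA best.2 = min best.2 4 + 1 := pvScoreA_eq_min _ hbn
  have hge : (best.2 ≥ 1) = (best.2 ≠ 0) := by
    apply propext; constructor <;> intro hx <;> omega
  simp only [hmin, hge]
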